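-- pv_equiv track=rewrite | github.com/lewiswigmore/builder-agent | tools/cloud/gpushield.py | _parse_canary_logs
-- ===== SOURCE A (Python) =====
-- from typing import Dict, Any, List, Optional, Tuple
--
-- def _parse_canary_logs(logs: str) -> Dict[str, Any]:
--     # Expect lines:
--     # CANARY_WRITE_OK pattern:<sha256> bytes:<N> time_ms:<T>
--     # NO_RESIDUE pattern:<sha256> scan_mode:<X> time_ms:<T>
--     # RESIDUE_DETECTED pattern:<sha256> matches:<N> max_bytes:<B> scan_mode:<X> time_ms:<T>
--     result = {"write": None, "scan": None}
--     for line in logs.splitlines():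
--         line = line.strip()
--         if line.startswith("CANARY_WRITE_OK"):
--             result["write"] = line
--         if line.startswith("NO_RESIDUE") or line.startswith("RESIDUE_DETECTED"):
--             result["scan"] = line
--     return result
-- ===== SOURCE B (Python) =====
-- def _is_write(line):
--     return line.startswith("CANARY_WRITE_OK")
--
--
-- def _is_scan(line):
--     return line.startswith("NO_RESIDUE") or line.startswith("RESIDUE_DETECTED")
--
--
-- def _parse_canary_logs(logs: str):
--     # Reverse scan with early exit: the last matching line forward = first match from the end.
--     write = None
--     scan = None
--     for raw in reversed(logs.splitlines()):
--         line = raw.strip()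
--         if write is None and _is_write(line):
--             write = line
--         if scan is None and _is_scan(line):
--             scan = line
--         if write is not None and scan is not None:
--             break
--     return {"write": write, "scan": scan}
-- ===== Notes on version B (the rewrite author's own statement) =====
-- stated objective: alternative
-- what changed: Replaces the forward full scan that overwrites dict slots with a reverse scan keeping the first match per slot and breaking as soon as both slots are filled.
import Mathlib
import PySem

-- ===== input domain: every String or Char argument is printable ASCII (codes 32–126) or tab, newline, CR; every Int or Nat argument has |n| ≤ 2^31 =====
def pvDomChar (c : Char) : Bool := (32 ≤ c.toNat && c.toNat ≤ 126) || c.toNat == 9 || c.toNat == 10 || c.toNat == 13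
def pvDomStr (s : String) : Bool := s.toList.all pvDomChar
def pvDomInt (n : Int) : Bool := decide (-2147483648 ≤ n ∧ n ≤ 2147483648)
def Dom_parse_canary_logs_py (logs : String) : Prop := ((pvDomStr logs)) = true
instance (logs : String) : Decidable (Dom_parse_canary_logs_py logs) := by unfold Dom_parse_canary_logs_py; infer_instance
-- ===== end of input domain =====

-- B replaces A's forward full scan (dict slots overwritten, last match wins) by a reverse scan
-- keeping the first match per slot with an early break once both are filled (alternative decomposition).


-- ===== PORT A =====
-- loop body of A's for-loop (named so the proofs can speak about it)
def pvStepA (d : PySem.Dict String (Option String)) (line : String) :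
    PySem.Dict String (Option String) :=
  let line := PySem.Str.strip line
  let d := if PySem.Str.startswith line "CANARY_WRITE_OK" then d.insert "write" (some line) else d
  let d := if PySem.Str.startswith line "NO_RESIDUE" || PySem.Str.startswith line "RESIDUE_DETECTED"
           then d.insert "scan" (some line) else d
  d

def parse_canary_logs_py (logs : String) : List (String × Option String) :=
  let result : PySem.Dict String (Option String) :=
    PySem.Dict.ofList [("write", none), ("scan", none)]
  let result := (PySem.Str.splitlines logs).foldl pvStepA result
  result.items

-- ===== PORT B =====
-- B's helper predicates on a stripped line
def pvIsWrite (line : String) : Bool := PySem.Str.startswith line "CANARY_WRITE_OK"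
def pvIsScan (line : String) : Bool :=
  PySem.Str.startswith line "NO_RESIDUE" || PySem.Str.startswith line "RESIDUE_DETECTED"

-- B's loop over the reversed line list, two slots, early break when both are filled
def pvLoopB : List String → Option String → Option String → Option String × Option String
  | [], write, scan => (write, scan)
  | raw :: rest, write, scan =>
    let line := PySem.Str.strip raw
    let write := if write.isNone && pvIsWrite line then some line else write
    let scan := if scan.isNone && pvIsScan line then some line else scan
    if write.isSome && scan.isSome then (write, scan) else pvLoopB rest write scan

def parse_canary_logs_py_alt (logs : String) : List (String × Option String) :=
  let ws := pvLoopB (PySem.Str.splitlines logs).reverse none none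
  [("write", ws.1), ("scan", ws.2)]

-- ===== PRECONDITION & SPEC =====
def Spec_parse_canary_logs_py (logs : String) (out : List (String × Option String)) : Prop := out = parse_canary_logs_py_alt logs
instance (logs : String) (out : List (String × Option String)) : Decidable (Spec_parse_canary_logs_py logs out) := by unfold Spec_parse_canary_logs_py; infer_instance

-- ===== CLAIM (what is proved, stated in full; the proofs are below) =====
def Claim_equal_parse_canary_logs_py : Prop := ∀ (logs : String), Dom_parse_canary_logs_py logs → Spec_parse_canary_logs_py logs (parse_canary_logs_py logs)

-- ===== LEMMAS AND PROOFS =====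

-- predicates for "the raw line, stripped, matches the write / scan slot"
def pvPW (l : String) : Bool := pvIsWrite (PySem.Str.strip l)
def pvPS (l : String) : Bool := pvIsScan (PySem.Str.strip l)

-- B's loop returns, for each slot, its initial value if set, else the first match in the list
theorem pvLoopB_eq (lines : List String) : ∀ (w s : Option String),
    pvLoopB lines w s =
      (w.or ((lines.find? pvPW).map PySem.Str.strip),
       s.or ((lines.find? pvPS).map PySem.Str.strip)) := by
  induction lines with
  | nil => intro w s; simp [pvLoopB]
  | cons raw rest ih =>
    intro w s
    simp only [pvLoopB]
    cases w <;> cases s <;>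
      cases hw : pvIsWrite (PySem.Str.strip raw) <;>
      cases hs : pvIsScan (PySem.Str.strip raw) <;>
        simp [pvPW, pvPS, hw, hs, ih, Option.or]

-- one step of A's fold on the two-key dict
theorem pvOfList_pair (w s : Option String) :
    PySem.Dict.ofList [("write", w), ("scan", s)] =
      PySem.Dict.mk [("write", w), ("scan", s)] := rfl

theorem pvStepA_eq (w s : Option String) (l : String) :
    pvStepA (PySem.Dict.ofList [("write", w), ("scan", s)]) l =
      PySem.Dict.ofList
        [("write", if pvPW l then some (PySem.Str.strip l) else w),
         ("scan", if pvPS l then some (PySem.Str.strip l) else s)] := by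
  cases hw : pvIsWrite (PySem.Str.strip l) <;> cases hs : pvIsScan (PySem.Str.strip l) <;>
    simp [pvIsWrite, pvIsScan] at hw hs <;>
    simp_all [pvStepA, pvPW, pvPS, pvIsWrite, pvIsScan, pvOfList_pair,
      PySem.Dict.insert, PySem.Dict.contains]

-- A's fold keeps, for each slot, the LAST match = first match of the reversed list
theorem pvFoldA_eq (lines : List String) : ∀ (w s : Option String),
    ((lines.foldl pvStepA (PySem.Dict.ofList [("write", w), ("scan", s)]))).items =
      [("write", ((lines.reverse.find? pvPW).map PySem.Str.strip).or w),
       ("scan", ((lines.reverse.find? pvPS).map PySem.Str.strip).or s)] := by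
  induction lines with
  | nil => intro w s; rfl
  | cons l rest ih =>
    intro w s
    rw [List.foldl_cons, pvStepA_eq, ih]
    have hw : (((l :: rest).reverse.find? pvPW).map PySem.Str.strip).or w
        = ((rest.reverse.find? pvPW).map PySem.Str.strip).or
            (if pvPW l then some (PySem.Str.strip l) else w) := by
      rw [List.reverse_cons, List.find?_append]
      cases rest.reverse.find? pvPW <;> by_cases h : pvPW l <;> simp [h, Option.or, List.find?]
    have hs : (((l :: rest).reverse.find? pvPS).map PySem.Str.strip).or s
        = ((rest.reverse.find? pvPS).map PySem.Str.strip).or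
            (if pvPS l then some (PySem.Str.strip l) else s) := by
      rw [List.reverse_cons, List.find?_append]
      cases rest.reverse.find? pvPS <;> by_cases h : pvPS l <;> simp [h, Option.or, List.find?]
    rw [hw, hs]

-- ===== VERDICT (by name: the statement is the Claim_ definition above) =====
theorem parse_canary_logs_py_spec : Claim_equal_parse_canary_logs_py := by
  intro logs _
  unfold Spec_parse_canary_logs_py parse_canary_logs_py parse_canary_logs_py_alt
  rw [pvFoldA_eq, pvLoopB_eq]
  simp only [Option.or_none, Option.none_or]
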